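-- pv_equiv track=rewrite | github.com/CKMaxwell/online-program-challenge | Python/Edabit/2_Easy/Smiley_Faces.py | happiness_number
-- ===== SOURCE A (Python) =====
-- def happiness_number(s):
--     count = 0
--     for i in range(len(s)-1):
--         if s[i:i+2] == ":)" or s[i:i+2] == "(:":
--             count += 1
--         elif s[i:i+2] == ":(" or s[i:i+2] == "):":
--             count -= 1
--     return count
-- ===== SOURCE B (Python) =====
-- def happiness_number(s):
--     return s.count(":)") + s.count("(:") - s.count(":(") - s.count("):")
-- ===== Notes on version B (the rewrite author's own statement) =====
-- stated objective: idiomatic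
-- what changed: Replaced the index loop with a running counter by four independent str.count substring scans combined arithmetically (no pattern overlaps itself, so non-overlapping count equals the per-window total).
import Mathlib
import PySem

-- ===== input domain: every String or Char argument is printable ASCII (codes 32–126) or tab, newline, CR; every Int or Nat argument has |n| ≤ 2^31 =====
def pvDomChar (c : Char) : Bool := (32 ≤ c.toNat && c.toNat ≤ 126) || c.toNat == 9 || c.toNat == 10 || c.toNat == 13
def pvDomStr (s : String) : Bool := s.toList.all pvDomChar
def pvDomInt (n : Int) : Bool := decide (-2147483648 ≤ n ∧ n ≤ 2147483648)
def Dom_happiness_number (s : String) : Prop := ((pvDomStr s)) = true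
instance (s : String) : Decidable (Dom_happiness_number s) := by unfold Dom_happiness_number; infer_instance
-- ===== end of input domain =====

-- B replaces A's single indexed pass with a running counter by four independent
-- substring-count scans combined arithmetically (idiomatic; none of the four
-- 2-character patterns overlaps itself, so non-overlapping counts agree with A's totals).


-- ===== PORT A =====
def happiness_number (s : String) : Int :=
  (PySem.List.pyRange 0 (PySem.Str.len s - 1) 1).foldl
    (fun count i =>
      if PySem.Str.slice s (some i) (some (i + 2)) = ":)" ∨
         PySem.Str.slice s (some i) (some (i + 2)) = "(:" then count + 1
      else if PySem.Str.slice s (some i) (some (i + 2)) = ":(" ∨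
              PySem.Str.slice s (some i) (some (i + 2)) = "):" then count - 1
      else count) 0

-- ===== PORT B =====
def happiness_number_alt (s : String) : Int :=
  (PySem.Str.count s ":)" : Int) + PySem.Str.count s "(:"
    - PySem.Str.count s ":(" - PySem.Str.count s "):"

-- ===== PRECONDITION & SPEC =====
def Spec_happiness_number (s : String) (out : Int) : Prop := out = happiness_number_alt s
instance (s : String) (out : Int) : Decidable (Spec_happiness_number s out) := by unfold Spec_happiness_number; infer_instance

-- ===== CLAIM (what is proved, stated in full; the proofs are below) =====
def Claim_equal_happiness_number : Prop := ∀ (s : String), Dom_happiness_number s → Spec_happiness_number s (happiness_number s)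

-- ===== LEMMAS AND PROOFS =====

-- weight of one 2-character window, as scored by A's if/elif chain
def pvW (p : List Char) : Int :=
  if p = [':', ')'] ∨ p = ['(', ':'] then 1
  else if p = [':', '('] ∨ p = [')', ':'] then -1
  else 0

-- number of adjacent positions whose window is exactly [a, b]
def pvPairCount (a b : Char) : List Char → Nat
  | x :: y :: t => (if x = a ∧ y = b then 1 else 0) + pvPairCount a b (y :: t)
  | _ => 0

-- total weight of all adjacent windows
def pvWinSum : List Char → Int
  | x :: y :: t => pvW [x, y] + pvWinSum (y :: t)
  | _ => 0

-- a window starting at the second char of a match cannot match again (a ≠ b)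
theorem pvPairCount_cons_eq (a b : Char) (hab : a ≠ b) (t : List Char) :
    pvPairCount a b (b :: t) = pvPairCount a b t := by
  match t with
  | [] => simp [pvPairCount]
  | z :: t' =>
    have : ¬ (b = a ∧ z = b) := by rintro ⟨hy, _⟩; exact hab hy.symm
    simp [pvPairCount, this]

-- str.count's non-overlapping scan counts exactly the matching windows when the
-- 2-character pattern cannot overlap itself (a ≠ b)
theorem pvGo_eq (a b : Char) (hab : a ≠ b) :
    ∀ (fuel : Nat) (l : List Char) (acc : Nat), l.length ≤ fuel →
      PySem.Chars.count.go [a, b] fuel l acc = acc + pvPairCount a b l := by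
  intro fuel
  induction fuel with
  | zero =>
    intro l acc h
    have : l = [] := List.eq_nil_of_length_eq_zero (Nat.le_zero.mp h)
    subst this
    simp [PySem.Chars.count.go, pvPairCount]
  | succ n ih =>
    intro l acc h
    match l with
    | [] => simp [PySem.Chars.count.go, pvPairCount]
    | [x] =>
      have hnp : ([a, b].isPrefixOf [x]) = false := by simp [List.isPrefixOf]
      simp [PySem.Chars.count.go, hnp, pvPairCount, ih [] acc (by simp)]
    | x :: y :: t =>
      simp only [PySem.Chars.count.go]
      by_cases hp : [a, b].isPrefixOf (x :: y :: t) = true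
      · have hx : a = x ∧ b = y := by
          simp [List.isPrefixOf] at hp; exact ⟨hp.1, hp.2⟩
        obtain ⟨hxa, hyb⟩ := hx; subst hxa; subst hyb
        simp only [hp, if_pos]
        have hlen : t.length ≤ n := by simp at h; omega
        rw [show List.drop [a, b].length (a :: b :: t) = t by simp]
        rw [ih t (acc + 1) hlen]
        simp [pvPairCount, pvPairCount_cons_eq a b hab t]
        omega
      · simp only [hp, Bool.false_eq_true, if_false]
        have hlen : (y :: t).length ≤ n := by simp at h ⊢; omega
        rw [ih (y :: t) acc hlen]
        have : ¬ (x = a ∧ y = b) := by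
          rintro ⟨h1, h2⟩; subst h1; subst h2
          simp [List.isPrefixOf] at hp
        simp [pvPairCount, this]

theorem pvCount_eq (a b : Char) (hab : a ≠ b) (l : List Char) :
    PySem.Chars.count l [a, b] = pvPairCount a b l := by
  have := pvGo_eq a b hab l.length l 0 (le_refl _)
  simpa [PySem.Chars.count] using this

-- the window-weight total decomposes into B's four pair counts
theorem pvWinSum_decomp (l : List Char) :
    pvWinSum l = (pvPairCount ':' ')' l : Int) + pvPairCount '(' ':' l
      - pvPairCount ':' '(' l - pvPairCount ')' ':' l := by
  match l with
  | [] => simp [pvWinSum, pvPairCount]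
  | [x] => simp [pvWinSum, pvPairCount]
  | x :: y :: t =>
    have ih := pvWinSum_decomp (y :: t)
    simp only [pvWinSum, pvPairCount, ih, pvW, List.cons.injEq, and_true]
    push_cast
    split_ifs <;> simp_all <;> omega

-- A's indexed sum of window weights equals the structural window-weight total
theorem pvRangeSum_eq (l : List Char) :
    ((List.range (l.length - 1)).map
        (fun i => pvW ((l.drop i).take 2))).sum = pvWinSum l := by
  match l with
  | [] => simp [pvWinSum]
  | [x] => simp [pvWinSum]
  | x :: y :: t =>
    have ih := pvRangeSum_eq (y :: t)
    show ((List.range (t.length + 1)).map (fun i => pvW (((x :: y :: t).drop i).take 2))).sum = _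
    rw [List.range_succ_eq_map]
    simp only [List.map_cons, List.map_map, List.sum_cons, Function.comp_def,
      List.drop_succ_cons, List.drop_zero]
    have : (y :: t).length - 1 = t.length := by simp
    rw [this] at ih
    rw [ih]
    simp [pvWinSum]

-- ===== VERDICT (by name: the statement is the Claim_ definition above) =====
theorem happiness_number_spec : Claim_equal_happiness_number := by
  intro s _
  unfold Spec_happiness_number happiness_number happiness_number_alt
  have hbody : (fun (count i : Int) =>
      if PySem.Str.slice s (some i) (some (i + 2)) = ":)" ∨
         PySem.Str.slice s (some i) (some (i + 2)) = "(:" then count + 1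
      else if PySem.Str.slice s (some i) (some (i + 2)) = ":(" ∨
              PySem.Str.slice s (some i) (some (i + 2)) = "):" then count - 1
      else count)
      = fun (count i : Int) => count + pvW ((PySem.Str.slice s (some i) (some (i + 2))).toList) := by
    funext count i
    simp only [← String.toList_inj, pvW,
      show (":)" : String).toList = [':', ')'] from rfl,
      show ("(:" : String).toList = ['(', ':'] from rfl,
      show (":(" : String).toList = [':', '('] from rfl,
      show ("):" : String).toList = [')', ':'] from rfl]
    split_ifs <;> omega
  rw [hbody, PySem.List.foldl_add, zero_add]
  simp only [PySem.Str.toList_slice, PySem.Chars.slice_eq_listSlice, PySem.Str.len_eq]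
  rcases hn : s.toList.length with _ | m
  · have : (((0 : Nat) : Int)) - 1 = -1 := by simp
    rw [this]
    have hr : PySem.List.pyRange 0 (-1) 1 = [] := by decide
    rw [hr]
    have hl : s.toList = [] := List.eq_nil_of_length_eq_zero hn
    simp [PySem.Str.count, hl,
      show (":)" : String).toList = [':', ')'] from rfl,
      show ("(:" : String).toList = ['(', ':'] from rfl,
      show (":(" : String).toList = [':', '('] from rfl,
      show ("):" : String).toList = [')', ':'] from rfl,
      pvCount_eq _ _ (by decide : (':' : Char) ≠ ')'),
      pvCount_eq _ _ (by decide : ('(' : Char) ≠ ':'),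
      pvCount_eq _ _ (by decide : (':' : Char) ≠ '('),
      pvCount_eq _ _ (by decide : (')' : Char) ≠ ':'),
      pvPairCount]
  · have : (((m + 1 : Nat) : Int)) - 1 = (m : Int) := by push_cast; ring
    rw [this, PySem.List.pyRange_zero_natCast]
    rw [List.map_map]
    have hmap : ∀ k : Nat, pvW (PySem.List.slice s.toList (some (k : Int)) (some ((k : Int) + 2)))
        = pvW ((s.toList.drop k).take 2) := by
      intro k
      rw [show ((k : Int) + 2) = ((k : Int) + ((2 : Nat) : Int)) by push_cast; ring,
        PySem.List.slice_natCast_add]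
    simp only [Function.comp_def, hmap]
    have := pvRangeSum_eq s.toList
    rw [hn] at this
    simp only [Nat.add_sub_cancel] at this
    rw [this]
    rw [pvWinSum_decomp]
    simp [PySem.Str.count,
      show (":)" : String).toList = [':', ')'] from rfl,
      show ("(:" : String).toList = ['(', ':'] from rfl,
      show (":(" : String).toList = [':', '('] from rfl,
      show ("):" : String).toList = [')', ':'] from rfl,
      pvCount_eq _ _ (by decide : (':' : Char) ≠ ')'),
      pvCount_eq _ _ (by decide : ('(' : Char) ≠ ':'),
      pvCount_eq _ _ (by decide : (':' : Char) ≠ '('),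
      pvCount_eq _ _ (by decide : (')' : Char) ≠ ':')]
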